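-- pv_equiv track=rewrite | github.com/trailbehind/TilingTools | set_s3_metadata.py | _prep_metadata
-- ===== SOURCE A (Python) =====
-- AWS_SYSTEM_METADATA_KEYS = [
--     "CacheControl",
--     "ContentDisposition",
--     "ContentEncoding",
--     "ContentLanguage",
--     "ContentType",
-- ]
--
-- def _prep_metadata(metadata):
--     """
--     Separate user and system defined metadata keys from metadata dict
--     passed from user input
--     """
--     sys_meta = {}
--     user_meta = {_k.replace("-", "").strip().lower() : _v for _k, _v in metadata.items()}
--     for syskey in AWS_SYSTEM_METADATA_KEYS:
--         if syskey.lower() in user_meta: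
--             sys_meta[syskey] = user_meta[syskey.lower()]
--             del user_meta[syskey.lower()]
--
--     return (sys_meta,user_meta)
-- ===== SOURCE B (Python) =====
-- AWS_SYSTEM_METADATA_KEYS = [
--     "CacheControl",
--     "ContentDisposition",
--     "ContentEncoding",
--     "ContentLanguage",
--     "ContentType",
-- ]
--
-- _SYS_CANON = {k.lower(): k for k in AWS_SYSTEM_METADATA_KEYS}
--
-- def _prep_metadata(metadata):
--     """
--     Separate user and system defined metadata keys in a single pass:
--     partition each normalized key directly into the system or user dict,
--     then emit the system dict in canonical AWS key order.
--     """
--     sys_vals = {}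
--     user_meta = {}
--     for _k, _v in metadata.items():
--         norm = _k.replace("-", "").strip().lower()
--         canon = _SYS_CANON.get(norm)
--         if canon is not None:
--             sys_vals[canon] = _v
--         else:
--             user_meta[norm] = _v
--     sys_meta = {k: sys_vals[k] for k in AWS_SYSTEM_METADATA_KEYS if k in sys_vals}
--     return (sys_meta, user_meta)
-- ===== Notes on version B (the rewrite author's own statement) =====
-- stated objective: alternative
-- what changed: B partitions metadata in a single pass using a precomputed lowercase->canonical map of AWS system keys (then emits the system dict in canonical order), instead of A's build-full-user-dict followed by a scan over the system keys that moves and deletes entries.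
import Mathlib
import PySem

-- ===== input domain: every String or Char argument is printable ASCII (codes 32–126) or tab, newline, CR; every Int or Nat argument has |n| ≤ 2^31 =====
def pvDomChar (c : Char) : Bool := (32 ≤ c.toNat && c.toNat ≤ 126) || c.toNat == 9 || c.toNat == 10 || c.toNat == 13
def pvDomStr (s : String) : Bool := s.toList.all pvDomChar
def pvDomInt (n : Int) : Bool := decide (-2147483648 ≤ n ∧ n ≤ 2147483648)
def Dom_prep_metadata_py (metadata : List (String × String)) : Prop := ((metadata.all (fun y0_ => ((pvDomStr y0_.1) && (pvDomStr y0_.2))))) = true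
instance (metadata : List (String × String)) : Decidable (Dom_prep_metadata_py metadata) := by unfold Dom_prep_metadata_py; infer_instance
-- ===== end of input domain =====

-- B replaces A's build-full-user-dict-then-move-and-delete with a single-pass partition
-- through a precomputed lowercase→canonical map (objective: alternative decomposition, same cost).

-- ===== PORT A =====
-- AWS_SYSTEM_METADATA_KEYS (shared module constant)
def pvAwsKeys : List String :=
  ["CacheControl", "ContentDisposition", "ContentEncoding", "ContentLanguage", "ContentType"]

-- _k.replace("-", "").strip().lower()
def pvNorm (k : String) : String :=
  PySem.Str.lower (PySem.Str.strip (PySem.Str.replace k "-" ""))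

-- user_meta[_k.replace("-","").strip().lower()] = _v  (dict-comprehension step)
def pvInsStep (d : PySem.Dict String String) (p : String × String) : PySem.Dict String String :=
  d.insert (pvNorm p.1) p.2

-- one iteration of A's 'for syskey in AWS_SYSTEM_METADATA_KEYS' loop
def pvAStep (su : PySem.Dict String String × PySem.Dict String String) (syskey : String) :
    PySem.Dict String String × PySem.Dict String String :=
  match su.2.get? (PySem.Str.lower syskey) with
  | some v => (su.1.insert syskey v, su.2.erase (PySem.Str.lower syskey))
  | none => su

def prep_metadata_py (metadata : List (String × String)) :
    (List (String × String)) × (List (String × String)) :=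
  let user0 : PySem.Dict String String := metadata.foldl pvInsStep PySem.Dict.empty
  let res := pvAwsKeys.foldl pvAStep (PySem.Dict.empty, user0)
  (res.1.items, res.2.items)

-- ===== PORT B =====
-- _SYS_CANON = {k.lower(): k for k in AWS_SYSTEM_METADATA_KEYS}
def pvSysCanon : PySem.Dict String String :=
  PySem.Dict.ofList (pvAwsKeys.map (fun k => (PySem.Str.lower k, k)))

-- one iteration of B's single pass over metadata.items()
def pvBStep (su : PySem.Dict String String × PySem.Dict String String) (p : String × String) :
    PySem.Dict String String × PySem.Dict String String :=
  match pvSysCanon.get? (pvNorm p.1) with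
  | some c => (su.1.insert c p.2, su.2)
  | none => (su.1, su.2.insert (pvNorm p.1) p.2)

-- {k: sys_vals[k] for k in AWS_SYSTEM_METADATA_KEYS if k in sys_vals}  (comprehension step)
def pvBSys (sv : PySem.Dict String String) (d : PySem.Dict String String) (k : String) :
    PySem.Dict String String :=
  match sv.get? k with
  | some v => d.insert k v
  | none => d

def prep_metadata_py_alt (metadata : List (String × String)) :
    (List (String × String)) × (List (String × String)) :=
  let su := metadata.foldl pvBStep (PySem.Dict.empty, PySem.Dict.empty)
  let sysMeta := pvAwsKeys.foldl (pvBSys su.1) PySem.Dict.empty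
  (sysMeta.items, su.2.items)

-- ===== PRECONDITION & SPEC =====
def Spec_prep_metadata_py (metadata : List (String × String)) (out : (List (String × String)) × (List (String × String))) : Prop := out = prep_metadata_py_alt metadata
instance (metadata : List (String × String)) (out : (List (String × String)) × (List (String × String))) : Decidable (Spec_prep_metadata_py metadata out) := by unfold Spec_prep_metadata_py; infer_instance

-- ===== CLAIM (what is proved, stated in full; the proofs are below) =====
def Claim_equal_prep_metadata_py : Prop := ∀ (metadata : List (String × String)), Dom_prep_metadata_py metadata → Spec_prep_metadata_py metadata (prep_metadata_py metadata)

-- ===== LEMMAS AND PROOFS =====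

-- list-level facts behind the Dict.erase lemmas (PySem states none about erase;
-- erase filters out every entry whose key matches)
theorem pv_filter_map_self (l : List (String × String)) (n v : String) :
    (l.map (fun p => if p.1 == n then (n, v) else p)).filter (fun p => !(p.1 == n))
      = l.filter (fun p => !(p.1 == n)) := by
  rw [List.filter_map]
  have h1 : l.filter ((fun p : String × String => !(p.1 == n)) ∘
        (fun p => if p.1 == n then (n, v) else p))
      = l.filter (fun p => !(p.1 == n)) := by
    refine List.filter_congr ?_
    intro a _
    by_cases h : a.1 = n <;> simp [h]
  rw [h1]
  have h2 : (l.filter (fun p => !(p.1 == n))).map (fun p => if p.1 == n then (n, v) else p)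
      = (l.filter (fun p => !(p.1 == n))).map id := by
    refine List.map_congr_left ?_
    intro a ha
    have hn : ¬ a.1 = n := by simpa using (List.mem_filter.mp ha).2
    simp [hn]
  rw [h2, List.map_id]

theorem pv_filter_map_ne (l : List (String × String)) (m n v : String) (h : m ≠ n) :
    (l.map (fun p => if p.1 == n then (n, v) else p)).filter (fun p => !(p.1 == m))
      = (l.filter (fun p => !(p.1 == m))).map (fun p => if p.1 == n then (n, v) else p) := by
  rw [List.filter_map]
  congr 1
  refine List.filter_congr ?_
  intro a _
  by_cases h1 : a.1 = n
  · simp [h1, Ne.symm h]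
  · simp [h1]

theorem pv_any_filter_ne (l : List (String × String)) (m n : String) (h : m ≠ n) :
    ((l.filter (fun p => !(p.1 == m))).any (fun p => p.1 == n)) = l.any (fun p => p.1 == n) := by
  rw [List.any_filter]
  refine List.any_congr rfl ?_
  intro a
  by_cases h1 : a.1 = n
  · simp [h1, Ne.symm h]
  · simp [h1]

theorem pv_find?_filter_ne (l : List (String × String)) (k m : String) (h : k ≠ m) :
    (l.filter (fun p => !(p.1 == m))).find? (fun p => p.1 == k)
      = l.find? (fun p => p.1 == k) := by
  rw [List.find?_filter]
  have hp : ∀ a : String × String,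
      (decide ((!(a.1 == m)) = true ∧ (a.1 == k) = true)) = (a.1 == k) := by
    intro a
    by_cases h1 : a.1 = k
    · simp [h1, h]
    · simp [h1]
  simp only [hp]

-- Dict.erase facts
theorem pv_erase_insert_self (d : PySem.Dict String String) (n v : String) :
    (d.insert n v).erase n = d.erase n := by
  apply PySem.Dict.ext
  show (d.insert n v).items.filter (fun p => !(p.1 == n)) = d.items.filter (fun p => !(p.1 == n))
  rw [PySem.Dict.items_insert]
  split
  · exact pv_filter_map_self d.items n v
  · simp [List.filter_append, List.filter_cons]

theorem pv_erase_insert_of_ne (d : PySem.Dict String String) (m n v : String) (h : m ≠ n) :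
    (d.insert n v).erase m = (d.erase m).insert n v := by
  apply PySem.Dict.ext
  have hc : (d.erase m).contains n = d.contains n := by
    show ((d.items.filter (fun p => !(p.1 == m))).any (fun p => p.1 == n)) = _
    exact pv_any_filter_ne d.items m n h
  show (d.insert n v).items.filter (fun p => !(p.1 == m)) = ((d.erase m).insert n v).items
  rw [PySem.Dict.items_insert, PySem.Dict.items_insert, hc]
  split
  · exact pv_filter_map_ne d.items m n v h
  · rw [List.filter_append]
    simp [PySem.Dict.erase, List.filter_cons, Ne.symm h]

theorem pv_erase_of_get?_none (d : PySem.Dict String String) (n : String)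
    (h : d.get? n = none) : d.erase n = d := by
  apply PySem.Dict.ext
  have hf : d.items.find? (fun p => p.1 == n) = none := by
    cases hfind : d.items.find? (fun p => p.1 == n) with
    | none => rfl
    | some p => simp [PySem.Dict.get?, hfind] at h
  show d.items.filter (fun p => !(p.1 == n)) = d.items
  refine List.filter_eq_self.mpr ?_
  intro p hp
  simpa using List.find?_eq_none.mp hf p hp

theorem pv_get?_erase_of_ne (d : PySem.Dict String String) (k m : String) (h : k ≠ m) :
    (d.erase m).get? k = d.get? k := by
  show ((d.items.filter (fun p => !(p.1 == m))).find? (fun p => p.1 == k)).map (·.2)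
      = (d.items.find? (fun p => p.1 == k)).map (·.2)
  rw [pv_find?_filter_ne d.items k m h]

-- proof-side decompositions of B's paired fold
def pvBStepS (s : PySem.Dict String String) (p : String × String) : PySem.Dict String String :=
  match pvSysCanon.get? (pvNorm p.1) with
  | some c => s.insert c p.2
  | none => s

def pvBStepU (u : PySem.Dict String String) (p : String × String) : PySem.Dict String String :=
  match pvSysCanon.get? (pvNorm p.1) with
  | some _ => u
  | none => u.insert (pvNorm p.1) p.2

theorem pvB_split (md : List (String × String)) (s u : PySem.Dict String String) :
    md.foldl pvBStep (s, u) = (md.foldl pvBStepS s, md.foldl pvBStepU u) := by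
  induction md generalizing s u with
  | nil => rfl
  | cons p rest ih =>
    simp only [List.foldl, pvBStep, pvBStepS, pvBStepU]
    cases h : pvSysCanon.get? (pvNorm p.1) <;> simp [h, ih]

-- the canonical-key map, concretely
theorem pvCanon_get (n : String) :
    pvSysCanon.get? n =
      if n = "cachecontrol" then some "CacheControl"
      else if n = "contentdisposition" then some "ContentDisposition"
      else if n = "contentencoding" then some "ContentEncoding"
      else if n = "contentlanguage" then some "ContentLanguage"
      else if n = "contenttype" then some "ContentType"
      else none := by
  have : pvSysCanon = PySem.Dict.mk
      [("cachecontrol", "CacheControl"), ("contentdisposition", "ContentDisposition"),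
       ("contentencoding", "ContentEncoding"), ("contentlanguage", "ContentLanguage"),
       ("contenttype", "ContentType")] := by decide
  rw [this]
  by_cases h1 : n = "cachecontrol" <;> by_cases h2 : n = "contentdisposition" <;>
    by_cases h3 : n = "contentencoding" <;> by_cases h4 : n = "contentlanguage" <;>
    by_cases h5 : n = "contenttype" <;>
    simp_all [PySem.Dict.get?_mk_cons, PySem.Dict.get?] <;>
    exact ⟨fun e => h1 e.symm, fun e => h2 e.symm, fun e => h3 e.symm,
      fun e => h4 e.symm, fun e => h5 e.symm⟩

-- lowercasing of the five canonical keys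
theorem pv_low1 : PySem.Str.lower "CacheControl" = "cachecontrol" := by decide
theorem pv_low2 : PySem.Str.lower "ContentDisposition" = "contentdisposition" := by decide
theorem pv_low3 : PySem.Str.lower "ContentEncoding" = "contentencoding" := by decide
theorem pv_low4 : PySem.Str.lower "ContentLanguage" = "contentlanguage" := by decide
theorem pv_low5 : PySem.Str.lower "ContentType" = "contenttype" := by decide

def pvLowKeys : List String :=
  ["cachecontrol", "contentdisposition", "contentencoding", "contentlanguage", "contenttype"]

-- erase-all-system-keys, the shape A's loop leaves the user dict in
def pvEraseAll (u : PySem.Dict String String) : PySem.Dict String String :=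
  pvLowKeys.foldl (fun u k => u.erase k) u

theorem pvEraseAll_insert_sys (u : PySem.Dict String String) (n v : String)
    (h : n ∈ pvLowKeys) : pvEraseAll (u.insert n v) = pvEraseAll u := by
  simp only [pvLowKeys, List.mem_cons, List.not_mem_nil, or_false] at h
  rcases h with h | h | h | h | h <;>
    subst h <;>
    simp [pvEraseAll, pvLowKeys, List.foldl, pv_erase_insert_self, pv_erase_insert_of_ne]

theorem pvEraseAll_insert_user (u : PySem.Dict String String) (n v : String)
    (h : n ∉ pvLowKeys) : pvEraseAll (u.insert n v) = (pvEraseAll u).insert n v := by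
  simp only [pvLowKeys, List.mem_cons, List.not_mem_nil, or_false, not_or] at h
  obtain ⟨h1, h2, h3, h4, h5⟩ := h
  simp [pvEraseAll, pvLowKeys, List.foldl,
    pv_erase_insert_of_ne _ _ _ _ (Ne.symm h1), pv_erase_insert_of_ne _ _ _ _ (Ne.symm h2),
    pv_erase_insert_of_ne _ _ _ _ (Ne.symm h3), pv_erase_insert_of_ne _ _ _ _ (Ne.symm h4),
    pv_erase_insert_of_ne _ _ _ _ (Ne.symm h5)]

theorem pvCanon_some_mem (n c : String) (h : pvSysCanon.get? n = some c) : n ∈ pvLowKeys := by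
  rw [pvCanon_get] at h
  simp only [pvLowKeys, List.mem_cons, List.not_mem_nil, or_false]
  split_ifs at h <;> simp_all

theorem pvCanon_none_not_mem (n : String) (h : pvSysCanon.get? n = none) : n ∉ pvLowKeys := by
  rw [pvCanon_get] at h
  simp only [pvLowKeys, List.mem_cons, List.not_mem_nil, or_false]
  split_ifs at h <;> simp_all

-- A's user dict after deletion = B's user dict
theorem pvUser_eq (md : List (String × String)) (u : PySem.Dict String String) :
    pvEraseAll (md.foldl pvInsStep u) = md.foldl pvBStepU (pvEraseAll u) := by
  induction md generalizing u with
  | nil => rfl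
  | cons p rest ih =>
    simp only [List.foldl, pvInsStep, pvBStepU]
    cases h : pvSysCanon.get? (pvNorm p.1) with
    | some c =>
      rw [ih, pvEraseAll_insert_sys _ _ _ (pvCanon_some_mem _ _ h)]
    | none =>
      rw [ih, pvEraseAll_insert_user _ _ _ (pvCanon_none_not_mem _ h)]

-- last-occurrence characterisation of the A-side user dict lookups
theorem pvGetA (md : List (String × String)) (d : PySem.Dict String String) (n : String) :
    (md.foldl pvInsStep d).get? n
      = md.foldl (fun acc p => if pvNorm p.1 = n then some p.2 else acc) (d.get? n) := by
  induction md generalizing d with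
  | nil => rfl
  | cons p rest ih =>
    have hstep : (pvInsStep d p).get? n
        = if pvNorm p.1 = n then some p.2 else d.get? n := by
      show (d.insert (pvNorm p.1) p.2).get? n = _
      rw [PySem.Dict.get?_insert]
      by_cases hx : pvNorm p.1 = n
      · simp [hx]
      · simp [hx, Ne.symm hx]
    simp only [List.foldl]
    rw [ih, hstep]

-- last-occurrence characterisation of B's sys_vals lookups at a canonical key
theorem pvGetB (md : List (String × String)) (s : PySem.Dict String String) (c lc : String)
    (hc : ∀ m : String, pvSysCanon.get? m = some c ↔ m = lc) :
    (md.foldl pvBStepS s).get? c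
      = md.foldl (fun acc p => if pvNorm p.1 = lc then some p.2 else acc) (s.get? c) := by
  induction md generalizing s with
  | nil => rfl
  | cons p rest ih =>
    have hstep : (pvBStepS s p).get? c
        = if pvNorm p.1 = lc then some p.2 else s.get? c := by
      simp only [pvBStepS]
      cases h : pvSysCanon.get? (pvNorm p.1) with
      | some c' =>
        show (s.insert c' p.2).get? c = _
        rw [PySem.Dict.get?_insert]
        by_cases he : c = c'
        · subst he
          simp [(hc _).mp h]
        · have hne : pvNorm p.1 ≠ lc := by
            intro e
            rw [(hc (pvNorm p.1)).mpr e] at h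
            exact he (Option.some_inj.mp h)
          simp [he, hne]
      | none =>
        show s.get? c = _
        have hne : pvNorm p.1 ≠ lc := by
          intro e
          rw [(hc (pvNorm p.1)).mpr e] at h
          simp at h
        simp [hne]
    simp only [List.foldl]
    rw [ih, hstep]

theorem pvGetAB (md : List (String × String)) (c lc : String)
    (hc : ∀ m : String, pvSysCanon.get? m = some c ↔ m = lc) :
    (md.foldl pvInsStep PySem.Dict.empty).get? lc
      = (md.foldl pvBStepS PySem.Dict.empty).get? c := by
  rw [pvGetA, pvGetB md PySem.Dict.empty c lc hc]
  simp [PySem.Dict.get?_empty]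

theorem pvhc1 : ∀ m : String, pvSysCanon.get? m = some "CacheControl" ↔ m = "cachecontrol" := by
  intro m; rw [pvCanon_get]; split_ifs <;> simp_all
theorem pvhc2 : ∀ m : String, pvSysCanon.get? m = some "ContentDisposition" ↔ m = "contentdisposition" := by
  intro m; rw [pvCanon_get]; split_ifs <;> simp_all
theorem pvhc3 : ∀ m : String, pvSysCanon.get? m = some "ContentEncoding" ↔ m = "contentencoding" := by
  intro m; rw [pvCanon_get]; split_ifs <;> simp_all
theorem pvhc4 : ∀ m : String, pvSysCanon.get? m = some "ContentLanguage" ↔ m = "contentlanguage" := by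
  intro m; rw [pvCanon_get]; split_ifs <;> simp_all
theorem pvhc5 : ∀ m : String, pvSysCanon.get? m = some "ContentType" ↔ m = "contenttype" := by
  intro m; rw [pvCanon_get]; split_ifs <;> simp_all

-- A's loop over a list of system keys with distinct lowercasings, split into
-- its sys-building part (reading the ORIGINAL user dict) and its user-erasing part
theorem pvA_loop_gen (L : List String) (s u : PySem.Dict String String)
    (hnd : (L.map PySem.Str.lower).Nodup) :
    L.foldl pvAStep (s, u)
      = (L.foldl (fun s k =>
            match u.get? (PySem.Str.lower k) with
            | some v => s.insert k v
            | none => s) s,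
         L.foldl (fun u k => u.erase (PySem.Str.lower k)) u) := by
  induction L generalizing s u with
  | nil => rfl
  | cons k rest ih =>
    simp only [List.map, List.nodup_cons] at hnd
    obtain ⟨hk, hrest⟩ := hnd
    simp only [List.foldl, pvAStep]
    cases h : u.get? (PySem.Str.lower k) with
    | none =>
      rw [ih _ _ hrest, pv_erase_of_get?_none u _ h]
    | some v =>
      rw [ih _ _ hrest]
      show (List.foldl (fun s' k' =>
          match (u.erase (PySem.Str.lower k)).get? (PySem.Str.lower k') with
          | some v' => s'.insert k' v'
          | none => s') (s.insert k v) rest,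
        List.foldl (fun u k => u.erase (PySem.Str.lower k)) (u.erase (PySem.Str.lower k)) rest)
        = (List.foldl (fun s' k' =>
          match u.get? (PySem.Str.lower k') with
          | some v' => s'.insert k' v'
          | none => s') (s.insert k v) rest,
        List.foldl (fun u k => u.erase (PySem.Str.lower k)) (u.erase (PySem.Str.lower k)) rest)
      refine Prod.ext ?_ rfl
      refine PySem.List.foldl_congr_mem _ _ _ _ ?_
      intro acc x hx
      have hne : PySem.Str.lower x ≠ PySem.Str.lower k := by
        intro e
        exact hk (e ▸ List.mem_map_of_mem hx)
      rw [pv_get?_erase_of_ne u _ _ hne]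

-- ===== VERDICT (by name: the statement is the Claim_ definition above) =====
theorem pvAwsNodup : (pvAwsKeys.map PySem.Str.lower).Nodup := by decide

theorem pvEraseAll_eq (d : PySem.Dict String String) :
    pvAwsKeys.foldl (fun u k => u.erase (PySem.Str.lower k)) d = pvEraseAll d := by
  simp only [pvAwsKeys, pvEraseAll, pvLowKeys, List.foldl,
    pv_low1, pv_low2, pv_low3, pv_low4, pv_low5]

theorem pvEraseAll_empty : pvEraseAll (PySem.Dict.empty (κ := String) (ν := String))
    = PySem.Dict.empty := rfl

set_option maxHeartbeats 1000000 in
theorem prep_metadata_py_spec : Claim_equal_prep_metadata_py := by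
  intro md _
  unfold Spec_prep_metadata_py
  have hsys : pvAwsKeys.foldl (fun s k =>
        match (md.foldl pvInsStep PySem.Dict.empty).get? (PySem.Str.lower k) with
        | some v => s.insert k v
        | none => s) PySem.Dict.empty
      = pvAwsKeys.foldl (pvBSys (md.foldl pvBStepS PySem.Dict.empty)) PySem.Dict.empty := by
    refine PySem.List.foldl_congr_mem _ _ _ _ ?_
    intro acc x hx
    simp only [pvAwsKeys, List.mem_cons, List.not_mem_nil, or_false] at hx
    rcases hx with h | h | h | h | h <;> subst h
    · simp only [pvBSys, pv_low1]
      rw [pvGetAB md _ _ pvhc1]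
    · simp only [pvBSys, pv_low2]
      rw [pvGetAB md _ _ pvhc2]
    · simp only [pvBSys, pv_low3]
      rw [pvGetAB md _ _ pvhc3]
    · simp only [pvBSys, pv_low4]
      rw [pvGetAB md _ _ pvhc4]
    · simp only [pvBSys, pv_low5]
      rw [pvGetAB md _ _ pvhc5]
  simp only [prep_metadata_py, prep_metadata_py_alt]
  rw [pvB_split]
  rw [pvA_loop_gen pvAwsKeys PySem.Dict.empty _ pvAwsNodup]
  dsimp only
  rw [pvEraseAll_eq, pvUser_eq, pvEraseAll_empty, hsys]
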